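-- pv_equiv track=rewrite | github.com/major-scale/anim-counting | scripts/conformal_cliff.py | carry_depth
-- ===== SOURCE A (Python) =====
-- def carry_depth(count):
--     """Compute carry cascade depth for count→count+1 transition."""
--     if count >= 14:
--         return -1
--     next_count = count + 1
--     depth = 0
--     xor = count ^ next_count
--     while xor > 0:
--         depth += 1
--         xor >>= 1
--     return depth - 1
-- ===== SOURCE B (Python) =====
-- def carry_depth(count):
--     """Compute carry cascade depth for count→count+1 transition."""
--     if count >= 14:
--         return -1
--     n = count + 1
--     return (n & -n).bit_length() - 1
-- ===== Notes on version B (the rewrite author's own statement) =====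
-- stated objective: simpler
-- what changed: Replaces the xor-and-shift counting loop by a loop-free closed form: the carry depth is the bit position of the lowest set bit of count+1, computed as (n & -n).bit_length() - 1, which also yields -1 at count == -1 without a special case.
import Mathlib
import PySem

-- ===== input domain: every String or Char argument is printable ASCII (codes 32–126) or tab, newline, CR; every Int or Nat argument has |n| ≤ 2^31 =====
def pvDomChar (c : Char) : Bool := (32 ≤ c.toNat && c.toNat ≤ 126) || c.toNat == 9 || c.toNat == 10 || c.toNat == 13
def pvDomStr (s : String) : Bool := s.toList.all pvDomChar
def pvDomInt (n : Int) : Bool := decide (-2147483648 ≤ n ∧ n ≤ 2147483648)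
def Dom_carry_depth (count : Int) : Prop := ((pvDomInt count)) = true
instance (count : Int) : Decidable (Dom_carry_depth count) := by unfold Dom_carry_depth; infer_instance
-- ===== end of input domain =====

-- B replaces A's xor-and-shift counting loop with a loop-free closed form:
-- the lowest set bit of count+1 via (n & -n).bit_length() - 1.


-- ===== PORT A =====
-- while xor > 0: depth += 1; xor >>= 1   (Python '>> 1' on Int = Lean '>>> (1 : Nat)')
def carryLoopA (xor : Int) (depth : Int) : Int :=
  if 0 < xor then carryLoopA (xor >>> (1 : Nat)) (depth + 1) else depth
  termination_by xor.toNat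
  decreasing_by
    simp only [Int.shiftRight_eq_div_pow, pow_one]
    omega

def carry_depth (count : Int) : Int :=
  if 14 ≤ count then -1
  else
    let next_count := count + 1
    carryLoopA (PySem.Int.bxor count next_count) 0 - 1

-- ===== PORT B =====
def carry_depth_alt (count : Int) : Int :=
  if 14 ≤ count then -1
  else
    let n := count + 1
    ((PySem.Int.bitLength (PySem.Int.band n (-n)) : Nat) : Int) - 1

-- ===== PRECONDITION & SPEC =====
def Spec_carry_depth (count : Int) (out : Int) : Prop := out = carry_depth_alt count
instance (count : Int) (out : Int) : Decidable (Spec_carry_depth count out) := by unfold Spec_carry_depth; infer_instance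

-- ===== CLAIM (what is proved, stated in full; the proofs are below) =====
def Claim_equal_carry_depth : Prop := ∀ (count : Int), Dom_carry_depth count → Spec_carry_depth count (carry_depth count)

-- ===== LEMMAS AND PROOFS =====

-- Nat doubling laws, from Mathlib's bit lemmas
theorem pv_nat_xor_two_mul_succ (n : Nat) :
    (2 * n + 1) ^^^ (2 * n + 2) = 2 * (n ^^^ (n + 1)) + 1 := by
  have h := Nat.xor_bit true n false (n + 1)
  simpa [Nat.bit] using h

theorem pv_nat_xor_two_mul (n : Nat) : (2 * n) ^^^ (2 * n + 1) = 1 := by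
  have h := Nat.xor_bit false n true n
  simpa [Nat.bit] using h

theorem pv_nat_and_two_mul_pred (n : Nat) (hn : 0 < n) :
    (2 * n) &&& (2 * n - 1) = 2 * (n &&& (n - 1)) := by
  obtain ⟨m, rfl⟩ : ∃ m, n = m + 1 := ⟨n - 1, by omega⟩
  have h := Nat.land_bit false (m + 1) true m
  have e : 2 * (m + 1) - 1 = 2 * m + 1 := by omega
  rw [e]
  simpa [Nat.bit] using h

-- A's loop computes bitLength on nonnegative inputs
theorem pv_loop_eq_bitLength (n : Nat) : ∀ d : Int,
    carryLoopA (n : Int) d = (PySem.Int.bitLength (n : Int) : Int) + d := by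
  induction n using Nat.strong_induction_on with
  | _ n ih =>
    intro d
    rcases Nat.eq_zero_or_pos n with h0 | hpos
    · subst h0
      rw [carryLoopA]
      simp
    · rw [carryLoopA]
      have hx : (0 : Int) < (n : Int) := by exact_mod_cast hpos
      rw [if_pos hx]
      have hsh : ((n : Int) >>> (1 : Nat)) = ((n / 2 : Nat) : Int) := by
        rw [Int.shiftRight_eq_div_pow, pow_one, Int.natCast_div]
      rw [hsh, ih (n / 2) (by omega) (d + 1),
          PySem.Int.bitLength_natCast hpos]
      push_cast
      ring

theorem pv_bitLength_pow (t : Nat) :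
    PySem.Int.bitLength ((2 ^ t : Nat) : Int) = t + 1 := by
  induction t with
  | zero =>
    rw [show ((2 ^ 0 : Nat) : Int) = ((1 : Nat) : Int) by norm_num,
        PySem.Int.bitLength_natCast (m := 1) (by norm_num)]
    simp
  | succ t ih =>
    rw [PySem.Int.bitLength_natCast (m := 2 ^ (t + 1)) (by positivity)]
    have e : 2 ^ (t + 1) / 2 = 2 ^ t := by
      rw [pow_succ]; omega
    rw [e, ih]

theorem pv_bitLength_mers (t : Nat) :
    PySem.Int.bitLength ((2 ^ (t + 1) - 1 : Nat) : Int) = t + 1 := by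
  induction t with
  | zero =>
    rw [show (2 ^ (0 + 1) - 1 : Nat) = 1 by norm_num,
        PySem.Int.bitLength_natCast (m := 1) (by norm_num)]
    simp
  | succ t ih =>
    have hpos : 0 < 2 ^ (t + 1 + 1) - 1 := by
      have : 1 < 2 ^ (t + 1 + 1) := Nat.one_lt_two_pow_iff.mpr (by omega)
      omega
    rw [PySem.Int.bitLength_natCast hpos]
    have e : (2 ^ (t + 1 + 1) - 1) / 2 = 2 ^ (t + 1) - 1 := by
      have h2 : 2 ^ (t + 1 + 1) = 2 * 2 ^ (t + 1) := by ring
      have h1 : 1 ≤ 2 ^ (t + 1) := Nat.one_le_two_pow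
      omega
    rw [e, ih]

-- doubling law for the A side: xor of an odd number with its successor
theorem pv_bxor_odd (k : Int) :
    PySem.Int.bxor (2 * k + 1) (2 * k + 2) = 2 * PySem.Int.bxor k (k + 1) + 1 := by
  rcases le_or_gt 0 k with hk | hk
  · -- k ≥ 0: all operands nonnegative
    rw [PySem.Int.bxor.eq_1, PySem.Int.bxor.eq_1]
    rw [if_pos (by omega : (0:Int) ≤ 2*k+1), if_pos (by omega : (0:Int) ≤ 2*k+2),
        if_pos hk, if_pos (by omega : (0:Int) ≤ k+1)]
    have e1 : (2 * k + 1).toNat = 2 * k.toNat + 1 := by omega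
    have e2 : (2 * k + 2).toNat = 2 * k.toNat + 2 := by omega
    have e3 : (k + 1).toNat = k.toNat + 1 := by omega
    rw [e1, e2, e3, pv_nat_xor_two_mul_succ]
    push_cast; ring
  · rcases eq_or_lt_of_le (by omega : k ≤ -1) with heq | hlt
    · subst heq; decide
    · -- k ≤ -2: all operands negative
      rw [PySem.Int.bxor.eq_1, PySem.Int.bxor.eq_1]
      rw [if_neg (by omega : ¬ (0:Int) ≤ 2*k+1), if_neg (by omega : ¬ (0:Int) ≤ 2*k+2),
          if_neg (by omega : ¬ (0:Int) ≤ k), if_neg (by omega : ¬ (0:Int) ≤ k+1)]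
      have e1 : (-(2 * k + 1) - 1).toNat = 2 * (-k - 1).toNat := by omega
      have e2 : (-(2 * k + 2) - 1).toNat = 2 * ((-k - 1).toNat - 1) + 1 := by omega
      have e3 : (-(k + 1) - 1).toNat = (-k - 1).toNat - 1 := by omega
      rw [e1, e2, e3]
      obtain ⟨m, hm⟩ : ∃ m, (-k - 1).toNat = m + 1 := ⟨(-k-1).toNat - 1, by omega⟩
      rw [hm]
      have h := Nat.xor_bit false (m + 1) true m
      simp [Nat.bit] at h
      have e4 : m + 1 - 1 = m := by omega
      rw [e4, h]
      push_cast; ring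

-- base case for the A side: xor of an even number with its successor is 1
theorem pv_bxor_even (k : Int) : PySem.Int.bxor (2 * k) (2 * k + 1) = 1 := by
  rcases le_or_gt 0 k with hk | hk
  · rw [PySem.Int.bxor.eq_1,
        if_pos (by omega : (0:Int) ≤ 2*k), if_pos (by omega : (0:Int) ≤ 2*k+1)]
    have e1 : (2 * k).toNat = 2 * k.toNat := by omega
    have e2 : (2 * k + 1).toNat = 2 * k.toNat + 1 := by omega
    rw [e1, e2, pv_nat_xor_two_mul]
    norm_num
  · rw [PySem.Int.bxor.eq_1,
        if_neg (by omega : ¬ (0:Int) ≤ 2*k), if_neg (by omega : ¬ (0:Int) ≤ 2*k+1)]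
    obtain ⟨m, hm⟩ : ∃ m, (-k - 1).toNat = m := ⟨(-k - 1).toNat, rfl⟩
    have e1 : (-(2 * k) - 1).toNat = 2 * m + 1 := by omega
    have e2 : (-(2 * k + 1) - 1).toNat = 2 * m := by omega
    rw [e1, e2]
    have h := Nat.xor_bit true m false m
    simp [Nat.bit] at h
    rw [h]
    simp

-- base case for the B side: n odd → n & -n = 1
theorem pv_band_odd (k : Int) : PySem.Int.band (2 * k + 1) (-(2 * k + 1)) = 1 := by
  rcases le_or_gt 0 k with hk | hk
  · rw [PySem.Int.band.eq_1,
        if_pos (by omega : (0:Int) ≤ 2*k+1), if_neg (by omega : ¬ (0:Int) ≤ -(2*k+1))]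
    have e1 : (2 * k + 1).toNat = 2 * k.toNat + 1 := by omega
    have e2 : (-(-(2 * k + 1)) - 1).toNat = 2 * k.toNat := by omega
    rw [e1, e2]
    have h := Nat.land_bit true k.toNat false k.toNat
    simp [Nat.bit] at h
    rw [h]
    omega
  · rw [PySem.Int.band.eq_1,
        if_neg (by omega : ¬ (0:Int) ≤ 2*k+1), if_pos (by omega : (0:Int) ≤ -(2*k+1))]
    obtain ⟨m, hm⟩ : ∃ m, (-k - 1).toNat = m := ⟨(-k - 1).toNat, rfl⟩
    have e1 : (-(2 * k + 1)).toNat = 2 * m + 1 := by omega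
    have e2 : (-(2 * k + 1) - 1).toNat = 2 * m := by omega
    rw [e1, e2]
    have h := Nat.land_bit true m false m
    simp [Nat.bit] at h
    rw [h]
    omega

-- doubling law for the B side: (2a) & -(2a) = 2 * (a & -a)
theorem pv_band_double (a : Int) :
    PySem.Int.band (2 * a) (-(2 * a)) = 2 * PySem.Int.band a (-a) := by
  rcases lt_trichotomy a 0 with ha | ha | ha
  · rw [PySem.Int.band.eq_1, PySem.Int.band.eq_1,
        if_neg (by omega : ¬ (0:Int) ≤ 2*a), if_pos (by omega : (0:Int) ≤ -(2*a)),
        if_neg (by omega : ¬ (0:Int) ≤ a), if_pos (by omega : (0:Int) ≤ -a)]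
    have e1 : (-(2 * a)).toNat = 2 * (-a).toNat := by omega
    have e2 : (-a - 1).toNat = (-a).toNat - 1 := by omega
    have e3 : (-(2*a) - 1).toNat = 2 * (-a).toNat - 1 := by omega
    rw [e1, e2, e3, pv_nat_and_two_mul_pred (-a).toNat (by omega)]
    have hle : (-a).toNat &&& ((-a).toNat - 1) ≤ (-a).toNat := Nat.and_le_left
    omega
  · subst ha; decide
  · rw [PySem.Int.band.eq_1, PySem.Int.band.eq_1,
        if_pos (by omega : (0:Int) ≤ 2*a), if_neg (by omega : ¬ (0:Int) ≤ -(2*a)),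
        if_pos (by omega : (0:Int) ≤ a), if_neg (by omega : ¬ (0:Int) ≤ -a)]
    have e1 : (2 * a).toNat = 2 * a.toNat := by omega
    have e2 : (-(-a) - 1).toNat = a.toNat - 1 := by omega
    have e3 : (-(-(2*a)) - 1).toNat = 2 * a.toNat - 1 := by omega
    rw [e1, e2, e3, pv_nat_and_two_mul_pred a.toNat (by omega)]
    have hle : a.toNat &&& (a.toNat - 1) ≤ a.toNat := Nat.and_le_left
    omega

-- structure theorem: for c ≠ -1, c & xor decompose as a power of two / a Mersenne number
theorem pv_struct : ∀ N : Nat, ∀ c : Int, c.natAbs ≤ N → c ≠ -1 →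
    ∃ t : Nat, PySem.Int.band (c + 1) (-(c + 1)) = ((2 ^ t : Nat) : Int) ∧
      PySem.Int.bxor c (c + 1) = ((2 ^ (t + 1) - 1 : Nat) : Int) := by
  intro N
  induction N with
  | zero =>
    intro c hle _
    have : c = 0 := by omega
    subst this
    exact ⟨0, by decide, by decide⟩
  | succ N ih =>
    intro c hle hne
    rcases Int.even_or_odd c with ⟨k, hk⟩ | ⟨k, hk⟩
    · -- c = 2k even : t = 0
      refine ⟨0, ?_, ?_⟩
      · have : c + 1 = 2 * k + 1 := by omega
        rw [this, pv_band_odd]; norm_num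
      · have h2 : c = 2 * k := by omega
        rw [h2, show (2 * k + 1 : Int) = 2 * k + 1 from rfl, pv_bxor_even]
        norm_num
    · -- c = 2k + 1 odd, k ≠ -1
      have hkne : k ≠ -1 := by intro h; apply hne; omega
      have hklt : k.natAbs ≤ N := by omega
      obtain ⟨t, hb, hx⟩ := ih k hklt hkne
      refine ⟨t + 1, ?_, ?_⟩
      · have e : c + 1 = 2 * (k + 1) := by omega
        rw [e, pv_band_double, hb]
        push_cast [pow_succ]; ring
      · have e1 : c = 2 * k + 1 := by omega
        have e2 : c + 1 = 2 * k + 2 := by omega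
        rw [e1, show (2 * k + 1 + 1 : Int) = 2 * k + 2 by ring, pv_bxor_odd, hx]
        have h1 : 1 ≤ 2 ^ (t + 1) := Nat.one_le_two_pow
        have h2 : 1 ≤ 2 ^ (t + 1 + 1) := Nat.one_le_two_pow
        push_cast [pow_succ]
        omega

-- ===== VERDICT (by name: the statement is the Claim_ definition above) =====
theorem carry_depth_spec : Claim_equal_carry_depth := by
  intro count _
  unfold Spec_carry_depth carry_depth carry_depth_alt
  by_cases h14 : 14 ≤ count
  · rw [if_pos h14, if_pos h14]
  · rw [if_neg h14, if_neg h14]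
    by_cases hm1 : count = -1
    · subst hm1
      show carryLoopA (PySem.Int.bxor (-1) (-1 + 1)) 0 - 1 =
        ((PySem.Int.bitLength (PySem.Int.band (-1 + 1) (-(-1 + 1))) : Nat) : Int) - 1
      have hx : PySem.Int.bxor (-1) (-1 + 1) = -1 := by decide
      have hb : PySem.Int.bitLength (PySem.Int.band (-1 + 1) (-(-1 + 1))) = 0 := by decide
      rw [hx, hb, carryLoopA]
      norm_num
    · obtain ⟨t, hb, hx⟩ := pv_struct count.natAbs count le_rfl hm1
      show carryLoopA (PySem.Int.bxor count (count + 1)) 0 - 1 =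
        ((PySem.Int.bitLength (PySem.Int.band (count + 1) (-(count + 1))) : Nat) : Int) - 1
      rw [hx, hb, pv_loop_eq_bitLength, pv_bitLength_mers, pv_bitLength_pow]
      omega
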